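-- pv_equiv track=rewrite | github.com/ifeanyi-okafor/email-memory-agent | memory/dedup.py | _extract_dated_entries
-- ===== SOURCE A (Python) =====
-- def _extract_dated_entries(ki_content: str) -> dict[str, str]:
--     """
--     Extract dated sub-entries from Key Interactions content.
--
--     Key Interactions sections contain ### YYYY-MM-DD sub-headings with
--     bullet points underneath. Returns {date_string: full_entry_text}.
--     """
--     entries: dict[str, str] = {}
--     current_date = None
--     current_lines: list[str] = []
--
--     for line in ki_content.split('\n'):
--         if line.startswith('### '):
--             # Save previous entry
--             if current_date:
--                 entries[current_date] = '\n'.join(current_lines).strip()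
--             current_date = line.strip()
--             current_lines = [line]
--         elif current_date:
--             current_lines.append(line)
--         # Lines before any ### date are ignored (shouldn't exist in well-formed files)
--
--     # Save last entry
--     if current_date:
--         entries[current_date] = '\n'.join(current_lines).strip()
--
--     return entries
-- ===== SOURCE B (Python) =====
-- def _extract_dated_entries(ki_content: str) -> dict[str, str]:
--     # Build the chunk list back-to-front in one reverse pass (lines before the
--     # first '### ' heading fall out naturally), then assign chunks forward so
--     # duplicate dates overwrite exactly as in a forward dict build.
--     chunks = []
--     cur = []
--     for line in reversed(ki_content.split('\n')):
--         cur.append(line)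
--         if line.startswith('### '):
--             chunks.append(cur[::-1])
--             cur = []
--     return {c[0].strip(): '\n'.join(c).strip() for c in reversed(chunks)}
-- ===== Notes on version B (the rewrite author's own statement) =====
-- stated objective: alternative
-- what changed: Replaces A's forward state machine (current_date/current_lines accumulator with save-on-next-heading and a final flush) by a single reverse pass that emits complete heading chunks back-to-front, then a dict comprehension over the chunks in forward order.
import Mathlib
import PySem

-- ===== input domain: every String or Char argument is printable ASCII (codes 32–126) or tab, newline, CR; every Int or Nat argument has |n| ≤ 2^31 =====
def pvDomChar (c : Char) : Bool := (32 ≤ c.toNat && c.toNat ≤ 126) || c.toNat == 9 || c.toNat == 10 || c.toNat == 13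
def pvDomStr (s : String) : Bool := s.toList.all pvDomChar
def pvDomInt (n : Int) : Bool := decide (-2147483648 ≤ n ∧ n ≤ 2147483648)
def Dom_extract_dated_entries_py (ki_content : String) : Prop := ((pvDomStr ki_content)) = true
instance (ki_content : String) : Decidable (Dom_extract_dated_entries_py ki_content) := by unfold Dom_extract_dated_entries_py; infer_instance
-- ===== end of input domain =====

-- B replaces A's forward state machine by a reverse pass emitting heading chunks
-- back-to-front, then a forward dict build over the chunks (objective: alternative).


-- ===== PORT A =====
-- one loop iteration: state is (entries, current_date, current_lines);
-- Python's `if current_date:` is truthiness on Optional[str] (None or "" is falsy)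
def extract_dated_entries_py_step
    (st : PySem.Dict String String × Option String × List String) (line : String) :
    PySem.Dict String String × Option String × List String :=
  match st with
  | (entries, current_date, current_lines) =>
    if PySem.Str.startswith line "### " then
      let entries' :=
        match current_date with
        | some c => if c = "" then entries
                    else entries.insert c (PySem.Str.strip (PySem.Str.join "\n" current_lines))
        | none => entries
      (entries', some (PySem.Str.strip line), [line])
    else
      match current_date with
      | some c => if c = "" then (entries, current_date, current_lines)
                  else (entries, current_date, current_lines ++ [line])
      | none => (entries, current_date, current_lines)

def extract_dated_entries_py (ki_content : String) : List (String × String) :=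
  let fin := List.foldl extract_dated_entries_py_step
    (PySem.Dict.empty, none, []) ((PySem.Str.split? ki_content "\n").getD [])
  match fin.2.1 with
  | some c => if c = "" then fin.1.items
              else (fin.1.insert c (PySem.Str.strip (PySem.Str.join "\n" fin.2.2))).items
  | none => fin.1.items

-- ===== PORT B =====
-- reverse-pass iteration: state is (chunks, cur); cur.append(line) then emit cur[::-1] at a heading
def extract_dated_entries_py_alt_step
    (st : List (List String) × List String) (line : String) :
    List (List String) × List String :=
  let cur := st.2 ++ [line]
  if PySem.Str.startswith line "### " then (st.1 ++ [cur.reverse], [])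
  else (st.1, cur)

-- c[0]: every chunk starts with its heading line, so the `.getD ""` default is unreachable
def extract_dated_entries_py_alt_ins
    (d : PySem.Dict String String) (c : List String) : PySem.Dict String String :=
  d.insert (PySem.Str.strip ((PySem.List.pyGet? c 0).getD ""))
           (PySem.Str.strip (PySem.Str.join "\n" c))

def extract_dated_entries_py_alt (ki_content : String) : List (String × String) :=
  let chunks := (List.foldl extract_dated_entries_py_alt_step
    ([], []) ((PySem.Str.split? ki_content "\n").getD []).reverse).1
  (List.foldl extract_dated_entries_py_alt_ins PySem.Dict.empty chunks.reverse).items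

-- ===== PRECONDITION & SPEC =====
def Spec_extract_dated_entries_py (ki_content : String) (out : List (String × String)) : Prop := out = extract_dated_entries_py_alt ki_content
instance (ki_content : String) (out : List (String × String)) : Decidable (Spec_extract_dated_entries_py ki_content out) := by unfold Spec_extract_dated_entries_py; infer_instance

-- ===== CLAIM (what is proved, stated in full; the proofs are below) =====
def Claim_equal_extract_dated_entries_py : Prop := ∀ (ki_content : String), Dom_extract_dated_entries_py ki_content → Spec_extract_dated_entries_py ki_content (extract_dated_entries_py ki_content)

-- ===== LEMMAS AND PROOFS =====

def pvNotHead (l : String) : Bool := !PySem.Str.startswith l "### "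

-- the heading-delimited chunks of a line list (pre-first-heading lines dropped)
def pvGroups : List String → List (List String)
  | [] => []
  | l :: rest =>
    if PySem.Str.startswith l "### " then
      (l :: rest.takeWhile pvNotHead) :: pvGroups (rest.dropWhile pvNotHead)
    else pvGroups rest
termination_by ls => ls.length
decreasing_by
  · exact Nat.lt_succ_of_le (List.length_dropWhile_le _ _)
  · exact Nat.lt_succ_self _

theorem pvHeadChars : "### ".toList = ['#', '#', '#', ' '] := rfl

theorem pvGroups_dropWhile (ls : List String) :
    pvGroups (ls.dropWhile pvNotHead) = pvGroups ls := by
  induction ls with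
  | nil => rfl
  | cons l rs ih =>
    by_cases h : PySem.Str.startswith l "### " = true
    · simp only [PySem.Str.startswith_eq, pvHeadChars] at h
      simp [List.dropWhile, pvNotHead, h]
    · simp only [Bool.not_eq_true, PySem.Str.startswith_eq, pvHeadChars] at h
      simp [List.dropWhile, pvNotHead, h, pvGroups, ih]

theorem pvStrip_head_ne (l : String) (h : PySem.Str.startswith l "### " = true) :
    PySem.Str.strip l ≠ "" := by
  rw [PySem.Str.startswith_eq, PySem.Chars.startswith_iff] at h
  obtain ⟨t, ht⟩ := h
  intro he
  have hl : (PySem.Str.strip l).toList = [] := by rw [he]; rfl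
  have hlist : l.toList = ['#', '#', '#', ' '] ++ t := by rw [← ht, pvHeadChars]
  rw [PySem.Str.toList_strip, hlist] at hl
  simp [PySem.Chars.strip, PySem.Chars.lstrip, PySem.Chars.rstrip,
    show PySem.Chars.isspace '#' = false from rfl, List.dropWhile_eq_nil_iff] at hl
  exact absurd (hl '#' (by simp)) (by decide)

-- the A-loop running inside a chunk equals inserting that chunk then folding the rest
theorem pvLoopA (rest : List String) :
    ∀ (d : PySem.Dict String String) (c : String) (cl : List String), c ≠ "" →
    (match List.foldl extract_dated_entries_py_step (d, some c, cl) rest with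
     | (e, some c', cl') => if c' = "" then e else e.insert c' (PySem.Str.strip (PySem.Str.join "\n" cl'))
     | (e, none, _) => e)
    = List.foldl extract_dated_entries_py_alt_ins
        (d.insert c (PySem.Str.strip (PySem.Str.join "\n" (cl ++ rest.takeWhile pvNotHead))))
        (pvGroups (rest.dropWhile pvNotHead)) := by
  induction rest with
  | nil =>
    intro d c cl hc
    simp [hc, pvGroups]
  | cons l rs ih =>
    intro d c cl hc
    rw [List.foldl_cons]
    by_cases h : PySem.Str.startswith l "### " = true
    · have hC := h
      rw [PySem.Str.startswith_eq, pvHeadChars] at hC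
      have hstep : extract_dated_entries_py_step (d, some c, cl) l
          = (d.insert c (PySem.Str.strip (PySem.Str.join "\n" cl)), some (PySem.Str.strip l), [l]) := by
        simp [extract_dated_entries_py_step, hC, hc]
      rw [hstep, ih _ _ _ (pvStrip_head_ne l h)]
      simp [pvGroups, pvNotHead, hC, extract_dated_entries_py_alt_ins]
    · simp only [Bool.not_eq_true] at h
      have hC := h
      rw [PySem.Str.startswith_eq, pvHeadChars] at hC
      have hstep : extract_dated_entries_py_step (d, some c, cl) l = (d, some c, cl ++ [l]) := by
        simp [extract_dated_entries_py_step, hC, hc]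
      rw [hstep, ih _ _ _ hc]
      simp [pvNotHead, hC, List.append_assoc]

theorem pvStartA (ls : List String) (d : PySem.Dict String String) :
    (match List.foldl extract_dated_entries_py_step (d, none, []) ls with
     | (e, some c', cl') => if c' = "" then e else e.insert c' (PySem.Str.strip (PySem.Str.join "\n" cl'))
     | (e, none, _) => e)
    = List.foldl extract_dated_entries_py_alt_ins d (pvGroups ls) := by
  induction ls generalizing d with
  | nil => simp [pvGroups]
  | cons l rs ih =>
    rw [List.foldl_cons]
    by_cases h : PySem.Str.startswith l "### " = true
    · have hC := h
      rw [PySem.Str.startswith_eq, pvHeadChars] at hC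
      have hstep : extract_dated_entries_py_step (d, none, []) l
          = (d, some (PySem.Str.strip l), [l]) := by
        simp [extract_dated_entries_py_step, hC]
      rw [hstep, pvLoopA rs _ _ _ (pvStrip_head_ne l h)]
      simp [pvGroups, hC, extract_dated_entries_py_alt_ins]
    · simp only [Bool.not_eq_true] at h
      have hC := h
      rw [PySem.Str.startswith_eq, pvHeadChars] at hC
      have hstep : extract_dated_entries_py_step (d, none, []) l = (d, none, []) := by
        simp [extract_dated_entries_py_step, hC]
      rw [hstep, ih d]
      simp [pvGroups, hC]

theorem pvLoopB (ls : List String) :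
    List.foldl extract_dated_entries_py_alt_step ([], []) ls.reverse
    = ((pvGroups ls).reverse, (ls.takeWhile pvNotHead).reverse) := by
  rw [List.foldl_reverse]
  induction ls with
  | nil => simp [pvGroups]
  | cons l rs ih =>
    rw [List.foldr_cons, ih]
    unfold extract_dated_entries_py_alt_step
    by_cases h : PySem.Str.startswith l "### " = true
    · rw [PySem.Str.startswith_eq, pvHeadChars] at h
      simp [h, pvGroups, pvNotHead, ← pvGroups_dropWhile rs,
        List.reverse_cons, List.reverse_append]
    · simp only [Bool.not_eq_true] at h
      rw [PySem.Str.startswith_eq, pvHeadChars] at h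
      simp [h, pvGroups, pvNotHead, List.reverse_cons]

theorem extract_dated_entries_py_spec : Claim_equal_extract_dated_entries_py := by
  intro ki _
  unfold Spec_extract_dated_entries_py extract_dated_entries_py extract_dated_entries_py_alt
  set ls := (PySem.Str.split? ki "\n").getD [] with hls
  rw [pvLoopB ls]
  simp only [List.reverse_reverse]
  rw [← pvStartA ls PySem.Dict.empty]
  rcases hfe : List.foldl extract_dated_entries_py_step (PySem.Dict.empty, none, []) ls with ⟨e, cd, cl⟩
  cases cd
  · simp
  · simp
    split_ifs <;> rfl
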